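-- pv_equiv track=rewrite | github.com/kgorgi/Multi-Label-IMDb-Movie-Genre-Classifier | processing/bayes_text_fast.py | CalculateMaxScore
-- ===== SOURCE A (Python) =====
-- def CalculateMaxScore(score):
--     current_max = score[0]
--     index_of_max = 0
--     for current_index, current_score in enumerate(score):
--         if current_score > current_max:
--             current_max = current_score
--             index_of_max = current_index
--     return index_of_max
-- ===== SOURCE B (Python) =====
-- def CalculateMaxScore(score):
--     return score.index(max(score))
-- ===== Notes on version B (the rewrite author's own statement) =====
-- stated objective: idiomatic
-- what changed: Replaces the hand-written fused max-tracking loop with the builtin max followed by list.index (two library passes), relying on both keeping the first maximal element.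
import Mathlib
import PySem

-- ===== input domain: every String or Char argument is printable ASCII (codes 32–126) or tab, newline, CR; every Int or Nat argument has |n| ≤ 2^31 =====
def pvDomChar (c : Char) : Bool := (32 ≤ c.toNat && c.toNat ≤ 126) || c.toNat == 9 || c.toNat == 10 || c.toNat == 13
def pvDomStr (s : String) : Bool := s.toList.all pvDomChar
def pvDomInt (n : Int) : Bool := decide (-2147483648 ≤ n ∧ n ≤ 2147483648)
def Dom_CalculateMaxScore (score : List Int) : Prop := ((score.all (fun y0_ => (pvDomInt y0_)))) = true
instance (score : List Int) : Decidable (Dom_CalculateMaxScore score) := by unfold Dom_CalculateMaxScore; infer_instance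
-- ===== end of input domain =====

-- B replaces A's fused max-tracking loop by the idiomatic max(score) + score.index(max) two-pass form.


-- ===== PORT A =====
-- loop body: if current_score > current_max then update (current_max, index_of_max)
def pvStepA (st : Int × Int) (p : Int × Int) : Int × Int :=
  if p.2 > st.1 then (p.2, p.1) else st

def CalculateMaxScore (score : List Int) : Int :=
  match score with
  | [] => 0  -- unreachable under Pre_: Python's score[0] raises IndexError here
  | h :: _ =>
    ((PySem.List.enumerate score 0).foldl pvStepA (h, 0)).2

-- ===== PORT B =====
def CalculateMaxScore_alt (score : List Int) : Int :=
  match PySem.List.max? score (fun x => x) with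
  | none => 0  -- unreachable under Pre_: Python's max([]) raises ValueError here
  | some m =>
    match PySem.List.index? score m with
    | some k => (k : Int)
    | none => 0  -- unreachable: the maximum is a member of the list

-- ===== PRECONDITION & SPEC =====
-- Pre_ excludes only the empty list, on which A raises IndexError (and B raises ValueError).
def Pre_CalculateMaxScore (score : List Int) : Prop := score ≠ []
instance (score : List Int) : Decidable (Pre_CalculateMaxScore score) := by
  unfold Pre_CalculateMaxScore; infer_instance

def pvWitness_CalculateMaxScore : List Int := [3, 7, 7, 1]

def Spec_CalculateMaxScore (score : List Int) (out : Int) : Prop := out = CalculateMaxScore_alt score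
instance (score : List Int) (out : Int) : Decidable (Spec_CalculateMaxScore score out) := by
  unfold Spec_CalculateMaxScore; infer_instance

-- ===== CLAIM (what is proved, stated in full; the proofs are below) =====
def Claim_equal_CalculateMaxScore : Prop := ∀ (score : List Int), Dom_CalculateMaxScore score → Pre_CalculateMaxScore score → Spec_CalculateMaxScore score (CalculateMaxScore score)

-- ===== LEMMAS AND PROOFS =====

-- Invariant of A's loop on x :: l: it ends in (max of the list, first index of that max).
theorem foldA_argmax (l : List Int) (x : Int) :
    ∃ k : Nat, PySem.List.index? (x :: l) (l.foldl max x) = some k ∧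
      (PySem.List.enumerate (x :: l) 0).foldl pvStepA (x, 0) = (l.foldl max x, (k : Int)) := by
  induction l using List.reverseRecOn with
  | nil =>
    refine ⟨0, ?_, ?_⟩
    · simp [PySem.List.index?]
    · simp [PySem.List.enumerate_cons, PySem.List.enumerate_nil, pvStepA]
  | append_singleton t y ih =>
    obtain ⟨k, hidx, hfold⟩ := ih
    have hM : (t ++ [y]).foldl max x = max (t.foldl max x) y := by
      simp [List.foldl_append]
    have henum : PySem.List.enumerate (x :: (t ++ [y])) 0
        = PySem.List.enumerate (x :: t) 0 ++ [(((0 : Int) + (x :: t).length), y)] := by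
      have : x :: (t ++ [y]) = (x :: t) ++ [y] := by simp
      rw [this, PySem.List.enumerate_append]
      simp [PySem.List.enumerate_cons, PySem.List.enumerate_nil]
    by_cases hy : y > t.foldl max x
    · -- y strictly improves: new max y at index (x::t).length
      refine ⟨(x :: t).length, ?_, ?_⟩
      · have hle : ∀ z ∈ x :: t, z ≤ t.foldl max x := by
          intro z hz
          rcases List.mem_cons.mp hz with h | h
          · exact h ▸ (PySem.List.le_foldl_max t x).1
          · exact (PySem.List.le_foldl_max t x).2 z h
        have hnotmem : y ∉ x :: t := fun hmem => absurd (hle y hmem) (not_le.mpr hy)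
        have h1 : (x :: (t ++ [y])) = (x :: t) ++ [y] := by simp
        rw [h1, hM, max_eq_right (le_of_lt hy),
          PySem.List.index?_append_singleton_self (x :: t) y hnotmem]
      · rw [henum, List.foldl_append, hfold]
        simp only [List.foldl, pvStepA, hM, max_eq_right (le_of_lt hy), if_pos hy]
        simp
    · -- no improvement: state unchanged
      push Not at hy
      have hmem : t.foldl max x ∈ x :: t := by
        have h2 := PySem.List.index?_isSome_iff (x :: t) (t.foldl max x)
        rw [hidx] at h2
        simpa using h2.mp rfl
      refine ⟨k, ?_, ?_⟩
      · have h1 : (x :: (t ++ [y])) = (x :: t) ++ [y] := by simp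
        rw [h1, hM, max_eq_left hy, PySem.List.index?_append_of_mem [y] hmem, hidx]
      · rw [henum, List.foldl_append, hfold]
        simp only [List.foldl, pvStepA, hM, max_eq_left hy]
        rw [if_neg (not_lt.mpr hy)]

-- ===== VERDICT (by name: the statement is the Claim_ definition above) =====
theorem CalculateMaxScore_spec : Claim_equal_CalculateMaxScore := by
  intro score _ hpre
  unfold Spec_CalculateMaxScore
  match score with
  | [] => exact absurd rfl hpre
  | x :: l =>
    obtain ⟨k, hidx, hfold⟩ := foldA_argmax l x
    have halt : CalculateMaxScore_alt (x :: l) = (k : Int) := by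
      unfold CalculateMaxScore_alt
      rw [PySem.List.max?_id_cons]
      show (match PySem.List.index? (x :: l) (l.foldl max x) with
            | some k => (k : Int) | none => 0) = (k : Int)
      rw [hidx]
    show ((PySem.List.enumerate (x :: l) 0).foldl pvStepA (x, 0)).2 = _
    rw [hfold, halt]
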